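-- pv_equiv track=rewrite | github.com/wagrenier/GameReversing | PS2/Fatal Frame 2/Python Scirpts/FileIO/SndFile.py | SndBankFileGet
-- ===== SOURCE A (Python) =====
-- snd_bank_max = 0x1E
--
-- def SndBankFileGet(param_1):
--     sVar1 = 0x0
--     iVar2 = 0x0
--
--     if (snd_bank_max < 1):
--         param_1 = 0
--     else:
--         sVar1 = (param_1 + 2)
--
--         while sVar1 != 0:
--             iVar2 += 1
--             if snd_bank_max <= iVar2:
--                 param_1 = 0
--                 return param_1
--             sVar1 = (param_1 + 0x12)
--             param_1 = param_1 + 0x10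
--
--     return param_1
-- ===== SOURCE B (Python) =====
-- snd_bank_max = 0x1E
--
-- def SndBankFileGet(param_1):
--     # closed form: the loop exits with -2 iff param_1 + 2 lies on the
--     # 16-step lattice {0, -16, ..., -16*29}; otherwise it returns 0
--     v = param_1 + 2
--     if v <= 0 and v % 16 == 0 and (-v) // 16 < snd_bank_max:
--         return -2
--     return 0
-- ===== Notes on version B (the rewrite author's own statement) =====
-- stated objective: simpler
-- what changed: Replaced the bounded while-loop over magic-constant state with a closed-form divisibility-and-range test on param_1 + 2.
import Mathlib
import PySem

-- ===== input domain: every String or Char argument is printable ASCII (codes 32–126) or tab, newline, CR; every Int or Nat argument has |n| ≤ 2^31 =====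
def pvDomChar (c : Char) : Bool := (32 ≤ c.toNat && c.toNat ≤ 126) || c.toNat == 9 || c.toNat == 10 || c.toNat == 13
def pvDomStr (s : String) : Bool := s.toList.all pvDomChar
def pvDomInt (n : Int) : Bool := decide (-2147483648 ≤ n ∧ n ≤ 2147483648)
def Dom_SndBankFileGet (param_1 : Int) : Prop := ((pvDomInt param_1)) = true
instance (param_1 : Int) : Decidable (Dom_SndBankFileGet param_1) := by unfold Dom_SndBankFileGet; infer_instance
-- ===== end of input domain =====

-- B replaces the 30-iteration while-loop with a closed-form divisibility/range test (simpler).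

-- ===== PORT A =====
def pvSndBankMax : Int := 30  -- 0x1E

-- the while-loop of A: state (param_1, sVar1, iVar2); 0x10 = 16, 0x12 = 18
def pvLoopA (param_1 sVar1 : Int) (iVar2 : Nat) : Int :=
  if sVar1 = 0 then param_1
  else if pvSndBankMax ≤ ((iVar2 + 1 : Nat) : Int) then 0
  else pvLoopA (param_1 + 16) (param_1 + 18) (iVar2 + 1)
termination_by 30 - iVar2
decreasing_by
  simp only [pvSndBankMax] at *
  omega

def SndBankFileGet (param_1 : Int) : Int :=
  if pvSndBankMax < 1 then 0
  else pvLoopA param_1 (param_1 + 2) 0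

-- ===== PORT B =====
def SndBankFileGet_alt (param_1 : Int) : Int :=
  if param_1 + 2 ≤ 0 ∧ PySem.Int.mod (param_1 + 2) 16 = 0 ∧
      PySem.Int.floordiv (-(param_1 + 2)) 16 < pvSndBankMax then -2
  else 0

-- ===== PRECONDITION & SPEC =====
def Spec_SndBankFileGet (param_1 : Int) (out : Int) : Prop := out = SndBankFileGet_alt param_1
instance (param_1 : Int) (out : Int) : Decidable (Spec_SndBankFileGet param_1 out) := by unfold Spec_SndBankFileGet; infer_instance

-- ===== CLAIM (what is proved, stated in full; the proofs are below) =====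
def Claim_equal_SndBankFileGet : Prop := ∀ (param_1 : Int), Dom_SndBankFileGet param_1 → Spec_SndBankFileGet param_1 (SndBankFileGet param_1)

-- ===== LEMMAS AND PROOFS =====

-- loop characterisation: with i + n = 29, the loop returns -2 iff p+2 is a nonpositive
-- multiple of 16 within reach of the remaining n iterations, else 0
theorem pvLoopA_eq (n : Nat) : ∀ (p : Int) (i : Nat), i + n = 29 →
    pvLoopA p (p + 2) i =
      (if p + 2 ≤ 0 ∧ (16 : Int) ∣ (p + 2) ∧ -(p + 2) ≤ 16 * (n : Int) then -2 else 0) := by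
  induction n with
  | zero =>
    intro p i hi
    rw [pvLoopA]
    by_cases h0 : p + 2 = 0
    · rw [if_pos h0, if_pos ⟨by omega, by omega, by push_cast; omega⟩]
      omega
    · rw [if_neg h0,
        if_pos (show pvSndBankMax ≤ ((i + 1 : Nat) : Int) by
          simp only [pvSndBankMax]; push_cast; omega),
        if_neg (show ¬(p + 2 ≤ 0 ∧ (16 : Int) ∣ (p + 2) ∧ -(p + 2) ≤ 16 * ((0 : Nat) : Int)) by
          rintro ⟨h1, h2, h3⟩; push_cast at h3; omega)]
  | succ m ih =>
    intro p i hi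
    rw [pvLoopA]
    by_cases h0 : p + 2 = 0
    · rw [if_pos h0, if_pos ⟨by omega, by omega, by push_cast; omega⟩]
      omega
    · rw [if_neg h0,
        if_neg (show ¬ pvSndBankMax ≤ ((i + 1 : Nat) : Int) by
          simp only [pvSndBankMax]; push_cast; omega)]
      have hrec := ih (p + 16) (i + 1) (by omega)
      have hx : p + 16 + 2 = p + 18 := by ring
      rw [hx] at hrec
      rw [hrec]
      refine if_congr ?_ rfl rfl
      constructor
      · rintro ⟨h1, h2, h3⟩
        refine ⟨by omega, by omega, by push_cast at h3 ⊢; omega⟩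
      · rintro ⟨h1, h2, h3⟩
        refine ⟨by omega, by omega, by push_cast at h3 ⊢; omega⟩

-- ===== VERDICT (by name: the statement is the Claim_ definition above) =====
theorem SndBankFileGet_spec : Claim_equal_SndBankFileGet := by
  intro p _
  unfold Spec_SndBankFileGet SndBankFileGet SndBankFileGet_alt
  rw [if_neg (show ¬ pvSndBankMax < 1 by simp [pvSndBankMax])]
  rw [pvLoopA_eq 29 p 0 rfl]
  have hm : PySem.Int.mod (p + 2) 16 = (p + 2) % 16 :=
    PySem.Int.mod_eq_emod_of_pos (by norm_num)
  have hd : PySem.Int.floordiv (-(p + 2)) 16 = (-(p + 2)) / 16 :=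
    PySem.Int.floordiv_eq_ediv_of_pos (by norm_num)
  by_cases hc : p + 2 ≤ 0 ∧ (16 : Int) ∣ (p + 2) ∧ -(p + 2) ≤ 16 * ((29 : Nat) : Int)
  · obtain ⟨h1, h2, h3⟩ := hc
    rw [if_pos ⟨h1, h2, h3⟩,
      if_pos (show p + 2 ≤ 0 ∧ PySem.Int.mod (p + 2) 16 = 0 ∧
          PySem.Int.floordiv (-(p + 2)) 16 < pvSndBankMax by
        refine ⟨h1, by rw [hm]; omega, ?_⟩
        rw [hd]; simp only [pvSndBankMax]; push_cast at h3; omega)]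
  · rw [if_neg hc,
      if_neg (show ¬(p + 2 ≤ 0 ∧ PySem.Int.mod (p + 2) 16 = 0 ∧
          PySem.Int.floordiv (-(p + 2)) 16 < pvSndBankMax) by
        rintro ⟨h1, h2, h3⟩
        rw [hm] at h2
        rw [hd] at h3
        simp only [pvSndBankMax] at h3
        exact hc ⟨h1, by omega, by push_cast; omega⟩)]
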